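-- pv_equiv track=rewrite | github.com/ryaneveson/COSC490FinalProject | 0-D/Phase2/Step6.py | _count_sequential_runs
-- ===== SOURCE A (Python) =====
-- SEQUENTIAL_ALPHA = "abcdefghijklmnopqrstuvwxyz"
--
-- SEQUENTIAL_DIGITS = "0123456789"
--
-- def _count_sequential_runs(password: str) -> int:
--     """Count runs of 3+ sequential characters (abc, 123, cba, 321)."""
--     p = password.lower()
--     count = 0
--     for seq_source in (SEQUENTIAL_ALPHA, SEQUENTIAL_DIGITS):
--         fwd = seq_source
--         rev = seq_source[::-1]
--         for src in (fwd, rev):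
--             for start in range(len(src) - 2):
--                 sub = src[start:start + 3]
--                 if sub in p:
--                     count += 1
--     return count
-- ===== SOURCE B (Python) =====
-- SEQUENTIAL_ALPHA = "abcdefghijklmnopqrstuvwxyz"
--
-- SEQUENTIAL_DIGITS = "0123456789"
--
-- # All length-3 sequential runs (ascending and descending, letters and digits).
-- _SEQ_TRIPLES = {
--     s[i:i + 3]
--     for src in (SEQUENTIAL_ALPHA, SEQUENTIAL_DIGITS)
--     for s in (src, src[::-1])
--     for i in range(len(s) - 2)
-- }
--
-- def _count_sequential_runs(password: str) -> int:
--     """Count runs of 3+ sequential characters (abc, 123, cba, 321)."""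
--     p = password.lower()
--     windows = {p[i:i + 3] for i in range(len(p) - 2)}
--     return len(windows & _SEQ_TRIPLES)
-- ===== Notes on version B (the rewrite author's own statement) =====
-- stated objective: alternative
-- what changed: Instead of scanning the password once per each of the 64 sequential triples, B precomputes the triple set once, builds the set of the password's length-3 windows in a single pass, and returns the size of the intersection of the two sets.
import Mathlib
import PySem

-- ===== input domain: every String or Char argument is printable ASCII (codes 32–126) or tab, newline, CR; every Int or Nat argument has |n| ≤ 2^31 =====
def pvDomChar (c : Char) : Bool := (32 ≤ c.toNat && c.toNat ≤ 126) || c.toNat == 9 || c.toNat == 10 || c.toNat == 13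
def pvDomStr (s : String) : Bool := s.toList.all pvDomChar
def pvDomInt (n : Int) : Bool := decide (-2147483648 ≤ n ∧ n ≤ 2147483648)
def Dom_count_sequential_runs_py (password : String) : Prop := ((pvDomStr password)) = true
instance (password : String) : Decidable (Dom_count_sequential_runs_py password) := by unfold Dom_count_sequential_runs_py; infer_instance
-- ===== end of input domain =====

-- B replaces A's per-triple scans of the password with one window-set built in a single
-- pass intersected with a precomputed set of the 64 sequential triples (alternative algorithm).

def pvSeqAlpha : List Char := "abcdefghijklmnopqrstuvwxyz".toList
def pvSeqDigits : List Char := "0123456789".toList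

-- ===== PORT A =====
def count_sequential_runs_py (password : String) : Int :=
  let p := PySem.Chars.lower password.toList
  [pvSeqAlpha, pvSeqDigits].foldl (fun count seq_source =>
    let fwd := seq_source
    -- seq_source[::-1]; slice? with step -1 never raises, .getD [] is unreachable
    let rev := (PySem.Chars.slice? seq_source none none (-1)).getD []
    [fwd, rev].foldl (fun c src =>
      (PySem.List.pyRange 0 (PySem.List.len src - 2) 1).foldl (fun c2 start =>
        let sub := PySem.Chars.slice src (some start) (some (start + 3))
        if PySem.Chars.isIn sub p then c2 + 1 else c2) c) count) 0

-- ===== PORT B =====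
-- the module-level _SEQ_TRIPLES set comprehension
def pvSeqTriples : PySem.Set (List Char) :=
  PySem.Set.ofList
    ([pvSeqAlpha, pvSeqDigits].flatMap (fun src =>
      [src, src.reverse].flatMap (fun s =>
        (List.range (s.length - 2)).map (fun i => (s.drop i).take 3))))

def count_sequential_runs_py_alt (password : String) : Int :=
  let p := PySem.Chars.lower password.toList
  let windows : PySem.Set (List Char) :=
    PySem.Set.ofList ((List.range (p.length - 2)).map (fun i => (p.drop i).take 3))
  PySem.Set.len (PySem.Set.inter windows pvSeqTriples)

-- ===== PRECONDITION & SPEC =====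
def Spec_count_sequential_runs_py (password : String) (out : Int) : Prop := out = count_sequential_runs_py_alt password
instance (password : String) (out : Int) : Decidable (Spec_count_sequential_runs_py password out) := by unfold Spec_count_sequential_runs_py; infer_instance

-- ===== CLAIM (what is proved, stated in full; the proofs are below) =====
def Claim_equal_count_sequential_runs_py : Prop := ∀ (password : String), Dom_count_sequential_runs_py password → Spec_count_sequential_runs_py password (count_sequential_runs_py password)

-- ===== LEMMAS AND PROOFS =====

-- the raw list of the 64 triples, in A's (and the comprehension's) order
def pvTriplesList : List (List Char) :=
  [pvSeqAlpha, pvSeqDigits].flatMap (fun src =>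
    [src, src.reverse].flatMap (fun s =>
      (List.range (s.length - 2)).map (fun i => (s.drop i).take 3)))

set_option maxRecDepth 20000 in
lemma pvTriplesList_nodup : pvTriplesList.Nodup := by decide

set_option maxRecDepth 20000 in
lemma pvTriplesList_len3 : ∀ t ∈ pvTriplesList, t.length = 3 := by decide

set_option maxRecDepth 200000 in
lemma pvSeqTriples_eq : pvSeqTriples = pvTriplesList := by decide

-- A's nested literal loops are exactly the fold over the 64 triples
set_option maxRecDepth 200000 in
lemma A_eq_fold (password : String) :
    count_sequential_runs_py password =
      pvTriplesList.foldl
        (fun c t => if PySem.Chars.isIn t (PySem.Chars.lower password.toList) then c + 1 else c) 0 := by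
  rfl

-- a length-3 list is a window of p iff it is a substring of p
lemma mem_windows_iff (p t : List Char) (ht : t.length = 3) :
    (t ∈ (List.range (p.length - 2)).map (fun i => (p.drop i).take 3)) ↔
      PySem.Chars.isIn t p = true := by
  rw [← PySem.Chars.exists_prefix_drop_iff_isIn]
  constructor
  · rintro h
    simp only [List.mem_map, List.mem_range] at h
    obtain ⟨i, hi, rfl⟩ := h
    exact ⟨i, List.take_prefix _ _⟩
  · rintro ⟨j, hpre⟩
    have hlen : t.length ≤ (p.drop j).length := hpre.length_le
    simp only [List.length_drop, ht] at hlen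
    simp only [List.mem_map, List.mem_range]
    refine ⟨j, by omega, ?_⟩
    have heq := List.prefix_iff_eq_take.mp hpre
    rw [ht] at heq
    exact heq.symm

theorem pv_main (password : String) :
    count_sequential_runs_py password = count_sequential_runs_py_alt password := by
  have hA := A_eq_fold password
  rw [PySem.List.foldl_count_if] at hA
  set p := PySem.Chars.lower password.toList with hp
  set W : List (List Char) :=
    PySem.Set.ofList ((List.range (p.length - 2)).map (fun i => (p.drop i).take 3)) with hW
  have hB : count_sequential_runs_py_alt password =
      ((W.filter (fun t => pvSeqTriples.contains t)).length : Int) := by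
    simp only [count_sequential_runs_py_alt, PySem.Set.inter, PySem.Set.len, ← hp, ← hW]
  have hperm : (W.filter (fun t => pvSeqTriples.contains t)).Perm
      (pvTriplesList.filter (fun t => PySem.Chars.isIn t p)) := by
    rw [List.perm_ext_iff_of_nodup
      ((PySem.Set.nodup_ofList _).filter _) (pvTriplesList_nodup.filter _)]
    have hc : ∀ u : List Char, (PySem.Set.contains pvTriplesList u = true) ↔ u ∈ pvTriplesList := by
      intro u; simp [PySem.Set.contains]
    intro t
    simp only [List.mem_filter, PySem.Set.mem_ofList, pvSeqTriples_eq, hc]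
    constructor
    · rintro ⟨hwin, htrip⟩
      exact ⟨htrip, (mem_windows_iff p t (pvTriplesList_len3 t htrip)).mp hwin⟩
    · rintro ⟨htrip, hin⟩
      exact ⟨(mem_windows_iff p t (pvTriplesList_len3 t htrip)).mpr hin, htrip⟩
  rw [hA, hB, hperm.length_eq, ← List.countP_eq_length_filter]
  simp

-- ===== VERDICT (by name: the statement is the Claim_ definition above) =====
theorem count_sequential_runs_py_spec : Claim_equal_count_sequential_runs_py := by
  intro password _
  unfold Spec_count_sequential_runs_py
  exact pv_main password
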